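-- pv_equiv track=rewrite | github.com/Amenhotep314/Interactive_Fiction | Game.py | remove_arcticles
-- ===== SOURCE A (Python) =====
-- def remove_arcticles(user_input):
--
--     """Removes common articles from a string
--     Args:
--         userInput (str): string from which to remove the articles
--     Returns:
--         str: the string without the articles"""
--
--     article_blacklist = ("a", "an", "the", "this", "that")
--
--     word_list = user_input.split()
--
--     for article in article_blacklist:
--
--         if article in word_list:
--
--             for i in range(word_list.count(article)):
--
--                 word_list.remove(article)
--
--     return " ".join(word_list)
-- ===== SOURCE B (Python) =====
-- def remove_arcticles(user_input):
--     articles = {"a", "an", "the", "this", "that"}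
--     return " ".join(w for w in user_input.split() if w not in articles)
-- ===== Notes on version B (the rewrite author's own statement) =====
-- stated objective: idiomatic
-- what changed: Single filtering pass over the words with a set membership test, instead of looping over the blacklist and repeatedly count()-ing and remove()-ing from the word list.
import Mathlib
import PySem

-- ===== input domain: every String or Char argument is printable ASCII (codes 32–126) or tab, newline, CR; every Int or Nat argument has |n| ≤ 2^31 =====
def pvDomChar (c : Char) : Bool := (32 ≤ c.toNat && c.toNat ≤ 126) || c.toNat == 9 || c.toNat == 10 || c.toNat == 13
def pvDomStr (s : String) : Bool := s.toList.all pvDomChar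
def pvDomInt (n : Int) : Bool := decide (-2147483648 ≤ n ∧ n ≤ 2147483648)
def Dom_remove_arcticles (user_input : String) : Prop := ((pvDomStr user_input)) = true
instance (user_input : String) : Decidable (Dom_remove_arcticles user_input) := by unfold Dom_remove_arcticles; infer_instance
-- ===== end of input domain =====

-- B replaces A's per-article count/remove loops by one idiomatic filtering pass over the words.

-- ===== PORT A =====
-- 'for i in range(word_list.count(article)): word_list.remove(article)'
def removeLoopA (ws : List String) (article : String) : List String :=
  (PySem.List.pyRange 0 (PySem.List.count ws article) 1).foldl
    (fun acc _ => (PySem.List.remove? acc article).getD acc) ws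

def remove_arcticles (user_input : String) : String :=
  let article_blacklist : List String := ["a", "an", "the", "this", "that"]
  let word_list := PySem.Str.split₀ user_input
  let word_list := article_blacklist.foldl
    (fun wl article => if wl.contains article then removeLoopA wl article else wl) word_list
  PySem.Str.join " " word_list

-- ===== PORT B =====
def remove_arcticles_alt (user_input : String) : String :=
  let articles : List String := ["a", "an", "the", "this", "that"]
  PySem.Str.join " " ((PySem.Str.split₀ user_input).filter (fun w => !(articles.contains w)))

-- ===== PRECONDITION & SPEC =====
def Spec_remove_arcticles (user_input : String) (out : String) : Prop := out = remove_arcticles_alt user_input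
instance (user_input : String) (out : String) : Decidable (Spec_remove_arcticles user_input out) := by unfold Spec_remove_arcticles; infer_instance

-- ===== CLAIM (what is proved, stated in full; the proofs are below) =====
def Claim_equal_remove_arcticles : Prop := ∀ (user_input : String), Dom_remove_arcticles user_input → Spec_remove_arcticles user_input (remove_arcticles user_input)

-- ===== LEMMAS AND PROOFS =====

theorem filter_ne_erase (a : String) (ws : List String) :
    (ws.erase a).filter (fun w => w != a) = ws.filter (fun w => w != a) := by
  induction ws with
  | nil => rfl
  | cons x xs ih =>
      by_cases h : x = a
      · subst h; simp
      · simp [h, ih]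

theorem iter_remove (a : String) (l : List Int) (ws : List String)
    (h : ws.count a = l.length) :
    l.foldl (fun acc _ => (PySem.List.remove? acc a).getD acc) ws
      = ws.filter (fun w => w != a) := by
  induction l generalizing ws with
  | nil =>
      simp only [List.foldl_nil]
      have : a ∉ ws := by
        intro hm
        have h2 := List.count_pos_iff.mpr hm
        rw [h] at h2
        simp at h2
      rw [List.filter_eq_self.mpr]
      intro w hw
      simp only [bne_iff_ne, ne_eq]
      intro he; exact this (he ▸ hw)
  | cons _ t ih =>
      have hmem : a ∈ ws := by
        by_contra hm
        rw [List.count_eq_zero_of_not_mem hm] at h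
        simp at h
      simp only [List.foldl_cons, PySem.List.remove?_eq_some_erase _ _ hmem, Option.getD_some]
      rw [ih (ws.erase a) (by rw [List.count_erase_self, h]; simp)]
      exact filter_ne_erase a ws

theorem removeLoopA_eq_filter (ws : List String) (a : String) :
    removeLoopA ws a = ws.filter (fun w => w != a) := by
  unfold removeLoopA
  apply iter_remove
  simp [PySem.List.count_eq, PySem.List.length_pyRange_one]

theorem stepA_eq_filter (ws : List String) (a : String) :
    (if ws.contains a then removeLoopA ws a else ws) = ws.filter (fun w => w != a) := by
  split
  · exact removeLoopA_eq_filter ws a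
  · next hc =>
      rw [List.filter_eq_self.mpr]
      intro w hw
      simp only [bne_iff_ne, ne_eq]
      intro he
      exact absurd ((List.contains_iff_mem).mpr (he ▸ hw)) hc

-- ===== VERDICT (by name: the statement is the Claim_ definition above) =====
theorem remove_arcticles_spec : Claim_equal_remove_arcticles := by
  intro user_input _
  unfold Spec_remove_arcticles remove_arcticles remove_arcticles_alt
  simp only [List.foldl_cons, List.foldl_nil, stepA_eq_filter, List.filter_filter]
  congr 1
  apply List.filter_congr
  intro w _
  simp only [List.contains_cons, List.contains_nil, Bool.not_or]
  cases hb : (w == "a") <;> cases hb2 : (w == "an") <;> cases hb3 : (w == "the") <;>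
    cases hb4 : (w == "this") <;> cases hb5 : (w == "that") <;>
    simp_all [bne, BEq.comm]
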